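-- pv_equiv track=rewrite | github.com/pypi-data/pypi-mirror-385 | packages/kkutils/kkutils-1.8.2.tar.gz/kkutils-1.8.2/tornado_utils/basehandler.py | decode_old
-- ===== SOURCE A (Python) =====
-- def decode_old(code):
--     source = 'JKUXE5PMTB7F831LICGADNHWO6VZS4RQ9Y2'
--     code = code.lstrip('0')
--     code = code[::-1]
--     uid = 0
--     for i, c in enumerate(code):
--         uid += source.index(c) * pow(len(source), i)
--     return uid
-- ===== SOURCE B (Python) =====
-- def decode_old(code):
--     source = 'JKUXE5PMTB7F831LICGADNHWO6VZS4RQ9Y2'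
--
--     def go(s):
--         if len(s) <= 1:
--             return source.index(s) if s else 0
--         m = len(s) // 2
--         return go(s[:m]) * len(source) ** len(s[m:]) + go(s[m:])
--
--     return go(code.lstrip('0'))
-- ===== Notes on version B (the rewrite author's own statement) =====
-- stated objective: faster
-- what changed: Replaces the reversed linear scan with a per-digit pow() by a divide-and-conquer recursion: split the stripped code in half, decode each half, combine as left*base**len(right)+right.
import Mathlib
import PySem

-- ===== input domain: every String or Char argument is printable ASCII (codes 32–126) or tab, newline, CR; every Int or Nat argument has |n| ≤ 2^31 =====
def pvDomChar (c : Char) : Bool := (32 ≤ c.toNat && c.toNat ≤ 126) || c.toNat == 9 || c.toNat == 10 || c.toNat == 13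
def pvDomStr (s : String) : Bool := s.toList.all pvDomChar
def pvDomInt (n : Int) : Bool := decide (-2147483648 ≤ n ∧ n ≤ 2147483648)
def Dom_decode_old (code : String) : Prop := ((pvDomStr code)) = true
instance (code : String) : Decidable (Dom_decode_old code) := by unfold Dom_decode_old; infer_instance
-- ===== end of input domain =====

-- B replaces A's reversed scan with a per-digit pow() by a balanced divide-and-conquer
-- split (objective: faster — quadratic bignum work becomes one pow per split level).

-- ===== PORT A =====
-- source = 'JKUXE5PMTB7F831LICGADNHWO6VZS4RQ9Y2' (as a character list)
def pvSource : List Char := "JKUXE5PMTB7F831LICGADNHWO6VZS4RQ9Y2".toList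

-- source.index(c); ValueError (c ∉ source) is excluded by Pre_decode_old, so getD 0 is never taken there
def pvDigit (c : Char) : Int := ((PySem.List.index? pvSource c).getD 0 : Nat)

def decode_old (code : String) : Int :=
  let stripped := code.toList.dropWhile (· == '0')   -- code = code.lstrip('0'); exact: drops exactly the leading '0's
  let rev := stripped.reverse                        -- code = code[::-1]; exact: step -1 full slice is reversal
  -- for i, c in enumerate(code): uid += source.index(c) * pow(len(source), i)
  -- i ≥ 0 always (enumerate from 0), so pow(len(source), i) is (len source : Int) ^ i.toNat, exact
  (PySem.List.enumerate rev 0).foldl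
    (fun uid p => uid + pvDigit p.2 * ((pvSource.length : Int) ^ p.1.toNat)) 0

-- ===== PORT B =====
-- def go(s): if len(s) <= 1: return source.index(s) if s else 0
--            m = len(s)//2; return go(s[:m]) * len(source)**len(s[m:]) + go(s[m:])
-- source.index(s) with len(s) = 1 is the index of its single character (exact);
-- the exponent len(s[m:]) is a nonneg length, so ** is ^ over Nat (exact).
def pvGo (s : List Char) : Int :=
  if s.length ≤ 1 then
    match s with
    | [] => 0
    | c :: _ => pvDigit c
  else
    let m := s.length / 2
    pvGo (s.take m) * (pvSource.length : Int) ^ (s.drop m).length + pvGo (s.drop m)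
termination_by s.length
decreasing_by
  · simp only [List.length_take]; omega
  · simp only [List.length_drop]; omega

def decode_old_alt (code : String) : Int :=
  pvGo (code.toList.dropWhile (· == '0'))   -- return go(code.lstrip('0'))

-- ===== PRECONDITION & SPEC =====
-- Pre_ excludes exactly the inputs where Python A raises ValueError: a character of the
-- stripped code that is not in the source alphabet (including any non-leading '0').
def Pre_decode_old (code : String) : Prop :=
  (code.toList.dropWhile (· == '0')).all (fun c => pvSource.contains c) = true
instance (code : String) : Decidable (Pre_decode_old code) := by unfold Pre_decode_old; infer_instance

def pvWitness_decode_old : String := "0K8"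

def Spec_decode_old (code : String) (out : Int) : Prop := out = decode_old_alt code
instance (code : String) (out : Int) : Decidable (Spec_decode_old code out) := by unfold Spec_decode_old; infer_instance

-- ===== CLAIM (what is proved, stated in full; the proofs are below) =====
def Claim_equal_decode_old : Prop := ∀ (code : String), Dom_decode_old code → Pre_decode_old code → Spec_decode_old code (decode_old code)

-- ===== LEMMAS AND PROOFS =====

-- Shifting lemma for the Horner fold: the accumulator factors out.
theorem horner_shift (l : List Char) (a : Int) :
    l.foldl (fun uid c => uid * (pvSource.length : Int) + pvDigit c) a
      = a * (pvSource.length : Int) ^ l.length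
        + l.foldl (fun uid c => uid * (pvSource.length : Int) + pvDigit c) 0 := by
  induction l generalizing a with
  | nil => simp
  | cons c t ih =>
    simp only [List.foldl_cons, List.length_cons]
    rw [ih (a * _ + _), ih (0 * _ + _)]
    ring

-- A's enumerate/pow sum over the reversed list equals the left-to-right Horner fold.
theorem sum_eq_horner (l : List Char) :
    (PySem.List.enumerate l.reverse 0).foldl
        (fun uid p => uid + pvDigit p.2 * ((pvSource.length : Int) ^ p.1.toNat)) 0
      = l.foldl (fun uid c => uid * (pvSource.length : Int) + pvDigit c) 0 := by
  induction l with
  | nil => simp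
  | cons c t ih =>
    have henum : PySem.List.enumerate (t.reverse ++ [c]) 0
        = PySem.List.enumerate t.reverse 0 ++ [((t.reverse.length : Int), c)] := by
      simpa using PySem.List.enumerate_append (xs := t.reverse) (ys := [c]) (s := 0)
    rw [List.reverse_cons, henum, List.foldl_append, ih]
    conv_rhs => rw [List.foldl_cons, horner_shift]
    simp only [List.foldl_cons, List.foldl_nil, Int.toNat_natCast, List.length_reverse]
    ring

-- The Horner fold of a concatenation: the combine step of B's divide and conquer.
theorem horner_append (s t : List Char) :
    (s ++ t).foldl (fun uid c => uid * (pvSource.length : Int) + pvDigit c) 0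
      = (s.foldl (fun uid c => uid * (pvSource.length : Int) + pvDigit c) 0)
          * (pvSource.length : Int) ^ t.length
        + t.foldl (fun uid c => uid * (pvSource.length : Int) + pvDigit c) 0 := by
  rw [List.foldl_append]
  exact horner_shift t _

-- B's divide-and-conquer recursion computes the left-to-right Horner fold.
theorem go_eq_horner (s : List Char) :
    pvGo s = s.foldl (fun uid c => uid * (pvSource.length : Int) + pvDigit c) 0 := by
  fun_induction pvGo s with
  | case1 => simp
  | case2 c tail h =>
    obtain rfl : tail = [] := by
      cases tail with
      | nil => rfl
      | cons _ _ => simp at h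
    simp
  | case3 s h m ih1 ih2 =>
    rw [ih1, ih2, ← horner_append, List.take_append_drop]

-- ===== VERDICT (by name: the statement is the Claim_ definition above) =====
theorem decode_old_spec : Claim_equal_decode_old := by
  intro code _ _
  unfold Spec_decode_old decode_old decode_old_alt
  rw [go_eq_horner]
  exact sum_eq_horner (code.toList.dropWhile (· == '0'))
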